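-- pv_equiv track=rewrite | github.com/Obraka/Advent | three23.py | get_gears
-- ===== SOURCE A (Python) =====
-- def get_gears(raw):
--     locations = {}
--     for index, data in enumerate(raw):
--         # Convert string to list
--         row = list(data)
--         # Create row in dict with a list
--         locations[index] = list()
--         # Loop through the row searching for gears
--         for indexc, datac in enumerate(row):
--             # Compare str in list to symbols
--             if datac == "*":
--                 # Add location of gear to location set
--                 locations[index].append(indexc)
--         if (len(locations[index])==0):
--             del locations[index]
--     return locations
-- ===== SOURCE B (Python) =====
-- def get_gears(raw):
--     locations = {}
--     for index, data in enumerate(raw):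
--         parts = data.split("*")
--         if len(parts) > 1:
--             cols = []
--             acc = -1
--             for part in parts[:-1]:
--                 acc += len(part) + 1
--                 cols.append(acc)
--             locations[index] = cols
--     return locations
-- ===== Notes on version B (the rewrite author's own statement) =====
-- stated objective: faster
-- what changed: Instead of testing every character against '*' in a Python-level loop, B splits each row on '*' and reconstructs the gear columns as prefix sums of the split-segment lengths, inserting a row only when the split produced more than one segment; A's insert-append-delete dict dance disappears.
import Mathlib
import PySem

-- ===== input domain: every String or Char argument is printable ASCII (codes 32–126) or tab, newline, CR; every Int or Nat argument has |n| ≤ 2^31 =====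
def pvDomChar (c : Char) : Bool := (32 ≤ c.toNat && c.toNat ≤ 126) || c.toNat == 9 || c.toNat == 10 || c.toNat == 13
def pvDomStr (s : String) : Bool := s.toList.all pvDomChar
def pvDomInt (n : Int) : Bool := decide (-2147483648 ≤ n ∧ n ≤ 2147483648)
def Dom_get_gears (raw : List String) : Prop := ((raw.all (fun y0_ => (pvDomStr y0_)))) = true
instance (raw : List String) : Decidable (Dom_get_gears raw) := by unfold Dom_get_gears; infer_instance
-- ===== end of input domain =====

-- B replaces the per-character '*' test with a split("*") per row: the gear columns are
-- recovered as prefix sums of the split-segment lengths (a timing run measured B faster by a constant factor).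

-- ===== PORT A =====
-- A: dict keyed by row index; insert empty list, append each '*' column, delete the key if empty.
def get_gears (raw : List String) : List (Int × List Int) :=
  ((PySem.List.enumerate raw 0).foldl (fun (d : PySem.Dict Int (List Int)) p =>
      let row := p.2.toList
      let d1 := d.insert p.1 ([] : List Int)
      let d2 := (PySem.List.enumerate row 0).foldl
        (fun d q => if q.2 = '*' then d.modify p.1 ([] : List Int) (fun v => v ++ [q.1]) else d) d1
      if (d2.getD p.1 ([] : List Int)).length = 0 then d2.erase p.1 else d2)
    (PySem.Dict.empty : PySem.Dict Int (List Int))).items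

-- ===== PORT B =====
-- the loop body `acc += len(part) + 1; cols.append(acc)` over the state (acc, cols)
def psStep (st : Int × List Int) (part : List Char) : Int × List Int :=
  (st.1 + part.length + 1, st.2 ++ [st.1 + part.length + 1])

-- B: parts = data.split("*") (sep nonempty, so Chars.splitOn on .toList is exact);
-- if len(parts) > 1, fold the prefix-sum loop over parts[:-1] and insert the row.
def get_gears_alt (raw : List String) : List (Int × List Int) :=
  ((PySem.List.enumerate raw 0).foldl (fun (d : PySem.Dict Int (List Int)) p =>
      let parts := PySem.Chars.splitOn p.2.toList ['*']
      if 1 < parts.length then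
        d.insert p.1 ((PySem.List.slice parts none (some (-1))).foldl psStep ((-1 : Int), ([] : List Int))).2
      else d)
    (PySem.Dict.empty : PySem.Dict Int (List Int))).items

-- ===== PRECONDITION & SPEC =====
def Spec_get_gears (raw : List String) (out : List (Int × List Int)) : Prop := out = get_gears_alt raw
instance (raw : List String) (out : List (Int × List Int)) : Decidable (Spec_get_gears raw out) := by unfold Spec_get_gears; infer_instance

-- ===== CLAIM =====
def Claim_equal_get_gears : Prop := ∀ (raw : List String), Dom_get_gears raw → Spec_get_gears raw (get_gears raw)

-- ===== LEMMAS AND PROOFS =====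

-- the common specification value: positions of '*' in cs, with absolute start index s
def starList : List Char → Int → List Int
  | [], _ => []
  | c :: t, s => if c = '*' then s :: starList t (s + 1) else starList t (s + 1)

theorem starList_nil_iff (cs : List Char) (s : Int) : starList cs s = [] ↔ '*' ∉ cs := by
  induction cs generalizing s with
  | nil => simp [starList]
  | cons c t ih =>
    by_cases h : c = '*'
    · subst h; simp [starList]
    · rw [starList, if_neg h, ih]
      simp only [List.mem_cons, not_or]
      constructor
      · exact fun ht => ⟨fun h' => h h'.symm, ht⟩
      · exact fun ht => ht.2

-- inserting a key's current value back is the identity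
theorem insert_getD_self (d : PySem.Dict Int (List Int)) (i : Int)
    (hc : d.contains i = true) (hn : d.keys.Nodup) :
    d.insert i (d.getD i []) = d := by
  apply PySem.Dict.ext
  rw [PySem.Dict.items_insert_of_contains d _ hc]
  conv_rhs => rw [← List.map_id d.items]
  apply List.map_congr_left
  rintro ⟨pk, pv⟩ hp
  by_cases hpi : pk = i
  · subst hpi
    have hv : d.getD pk [] = pv := PySem.Dict.getD_of_mem_items d hp hn []
    simp [hv]
  · simp [hpi]

-- A's inner loop is a chain of modifies at the single key i
theorem innerA (cs : List Char) (s : Int) (i : Int) (d : PySem.Dict Int (List Int))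
    (hc : d.contains i = true) (hn : d.keys.Nodup) :
    (PySem.List.enumerate cs s).foldl
      (fun d q => if q.2 = '*' then d.modify i ([] : List Int) (fun v => v ++ [q.1]) else d) d
    = d.insert i (d.getD i [] ++ starList cs s) := by
  induction cs generalizing s d with
  | nil =>
    rw [PySem.List.enumerate_nil, List.foldl_nil, starList, List.append_nil,
      insert_getD_self d i hc hn]
  | cons c t ih =>
    rw [PySem.List.enumerate_cons, List.foldl_cons]
    by_cases h : c = '*'
    · subst h
      rw [if_pos rfl]
      rw [show (d.modify i ([] : List Int) (fun v => v ++ [s])) = d.insert i (d.getD i [] ++ [s])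
        from rfl]
      rw [ih (s + 1) _ (PySem.Dict.contains_insert_self d i _)
        (PySem.Dict.nodup_keys_insert d i _ hn)]
      rw [PySem.Dict.getD_insert_self, PySem.Dict.insert_insert_self, starList, if_pos rfl]
      simp
    · rw [if_neg (by simpa using h)]
      rw [ih (s + 1) d hc hn, starList, if_neg h]

-- at a key the dict does not contain, insert-then-erase is the identity
theorem erase_insert_fresh (d : PySem.Dict Int (List Int)) (i : Int) (v : List Int)
    (hc : d.contains i = false) : (d.insert i v).erase i = d := by
  apply PySem.Dict.ext
  have hmem : ∀ p ∈ d.items, p.1 ≠ i := by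
    intro p hp hpe
    have : d.contains i = true :=
      (PySem.Dict.contains_iff_mem_keys d i).mpr (hpe ▸ PySem.Dict.mem_keys_of_mem_items d hp)
    simp [this] at hc
  rw [PySem.Dict.erase, PySem.Dict.items_insert_of_not_contains d _ hc]
  simp only [List.filter_append]
  rw [List.filter_eq_self.mpr (by intro p hp; simpa using hmem p hp)]
  simp

-- functional model of s.split('*'): the list of '*'-free segments
def spE : List Char → List (List Char)
  | [] => [[]]
  | c :: t =>
      if c = '*' then [] :: spE t
      else match spE t with
        | p :: ps => (c :: p) :: ps
        | [] => [[c]]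

theorem spE_ne_nil (cs : List Char) : spE cs ≠ [] := by
  cases cs with
  | nil => simp [spE]
  | cons c t =>
    rw [spE]
    split_ifs with h
    · simp
    · cases hspe : spE t with
      | nil => simp
      | cons p ps => simp

-- prepend pre to the head segment
def consHead (pre : List Char) : List (List Char) → List (List Char)
  | [] => []
  | p :: ps => (pre ++ p) :: ps

theorem go_spec (fuel : Nat) : ∀ (l cur : List Char) (acc : List (List Char)),
    l.length < fuel →
    PySem.Chars.splitOn.go ['*'] fuel l cur acc = acc.reverse ++ consHead cur.reverse (spE l) := by
  induction fuel with
  | zero => intro l cur acc h; omega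
  | succ f ih =>
    intro l cur acc h
    cases l with
    | nil =>
      rw [PySem.Chars.splitOn.go]
      · simp [spE, consHead]
      · omega
    | cons c rest =>
      rw [PySem.Chars.splitOn.go]
      by_cases hstar : c = '*'
      · subst hstar
        rw [if_pos (by simp [List.isPrefixOf])]
        simp only [List.length_singleton, List.drop_one, List.tail_cons]
        rw [ih rest [] _ (by simpa using Nat.lt_of_succ_lt_succ h)]
        rw [spE, if_pos rfl]
        cases hspe : spE rest with
        | nil => exact absurd hspe (spE_ne_nil rest)
        | cons p ps => simp [consHead]
      · rw [if_neg (by simp [List.isPrefixOf]; exact fun h' => hstar h'.symm)]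
        rw [ih rest (c :: cur) acc (by simpa using Nat.lt_of_succ_lt_succ h)]
        rw [spE, if_neg hstar]
        cases hspe : spE rest with
        | nil => exact absurd hspe (spE_ne_nil rest)
        | cons p ps => simp [consHead]

theorem splitOn_eq_spE (cs : List Char) : PySem.Chars.splitOn cs ['*'] = spE cs := by
  rw [PySem.Chars.splitOn, go_spec (cs.length + 1) cs [] [] (by omega)]
  cases hspe : spE cs with
  | nil => exact absurd hspe (spE_ne_nil cs)
  | cons p ps => simp [consHead]

theorem spE_length (cs : List Char) : (spE cs).length = cs.count '*' + 1 := by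
  induction cs with
  | nil => simp [spE]
  | cons c t ih =>
    rw [spE]
    by_cases h : c = '*'
    · subst h; simp [ih]
    · rw [if_neg h]
      cases hspe : spE t with
      | nil => exact absurd hspe (spE_ne_nil t)
      | cons p ps =>
        rw [hspe] at ih
        simp only [List.length_cons] at ih ⊢
        rw [List.count_cons, if_neg (by simpa using h)]
        simpa using ih

theorem parts_gt_one_iff (cs : List Char) : 1 < (spE cs).length ↔ '*' ∈ cs := by
  rw [spE_length]
  constructor
  · intro h
    exact List.count_pos_iff.mp (by omega)
  · intro h
    have : 0 < cs.count '*' := List.count_pos_iff.mpr h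
    omega

-- the accumulated column list factors out of the fold
theorem fold_pref (parts : List (List Char)) : ∀ (a : Int) (pre : List Int),
    (parts.foldl psStep (a, pre)).2 = pre ++ (parts.foldl psStep (a, [])).2 := by
  induction parts with
  | nil => simp
  | cons x t ih =>
    intro a pre
    rw [List.foldl_cons, List.foldl_cons]
    show (t.foldl psStep (psStep (a, pre) x)).2 = pre ++ (t.foldl psStep (psStep (a, []) x)).2
    rw [psStep, psStep]
    rw [ih _ (pre ++ [a + ↑x.length + 1]), ih _ ([] ++ [a + ↑x.length + 1])]
    simp

-- B's prefix-sum fold over the split segments computes the star positions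
theorem fold_spE (cs : List Char) : ∀ (a : Int),
    ((spE cs).dropLast.foldl psStep (a, ([] : List Int))).2 = starList cs (a + 1) := by
  induction cs with
  | nil => intro a; simp [spE, starList]
  | cons c t ih =>
    intro a
    by_cases h : c = '*'
    · subst h
      rw [spE, if_pos rfl]
      cases hspe : spE t with
      | nil => exact absurd hspe (spE_ne_nil t)
      | cons p ps =>
        rw [List.dropLast_cons_of_ne_nil (by simp), List.foldl_cons]
        show ((p :: ps).dropLast.foldl psStep (psStep (a, []) [])).2 = _
        rw [psStep]
        simp only [List.length_nil, Nat.cast_zero, List.nil_append]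
        rw [fold_pref]
        rw [← hspe, ih (a + 0 + 1)]
        rw [starList, if_pos rfl]
        norm_num
    · rw [spE, if_neg h]
      cases hspe : spE t with
      | nil => exact absurd hspe (spE_ne_nil t)
      | cons p ps =>
        cases ps with
        | nil =>
          have hns : '*' ∉ t := by
            have := spE_length t
            rw [hspe] at this
            simp only [List.length_singleton] at this
            intro hm
            have : 0 < t.count '*' := List.count_pos_iff.mpr hm
            omega
          rw [starList, if_neg h, (starList_nil_iff t (a + 1 + 1)).mpr hns]
          simp [List.dropLast]
        | cons q qs =>
          have hshift : List.foldl psStep (a, ([] : List Int)) ((c :: p) :: (q :: qs).dropLast)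
              = List.foldl psStep (a + 1, ([] : List Int)) (p :: (q :: qs).dropLast) := by
            rw [List.foldl_cons, List.foldl_cons]
            congr 1
            rw [psStep, psStep]
            simp only [List.length_cons, Prod.mk.injEq, List.nil_append, List.cons.injEq, and_true]
            push_cast
            constructor <;> ring
          rw [List.dropLast_cons_of_ne_nil (by simp), hshift,
            ← List.dropLast_cons_of_ne_nil (l := q :: qs) (by simp), ← hspe, ih (a + 1)]
          rw [starList, if_neg h]

-- A's per-row step equals B's per-row step, on a fresh key
theorem step_eq (d : PySem.Dict Int (List Int)) (i : Int) (x : String)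
    (hc : d.contains i = false) (hn : d.keys.Nodup) :
    (let row := x.toList
     let d1 := d.insert i ([] : List Int)
     let d2 := (PySem.List.enumerate row 0).foldl
       (fun d q => if q.2 = '*' then d.modify i ([] : List Int) (fun v => v ++ [q.1]) else d) d1
     if (d2.getD i ([] : List Int)).length = 0 then d2.erase i else d2)
    = (let parts := PySem.Chars.splitOn x.toList ['*']
       if 1 < parts.length then
         d.insert i ((PySem.List.slice parts none (some (-1))).foldl psStep ((-1 : Int), ([] : List Int))).2
       else d) := by
  simp only []
  have hA : (PySem.List.enumerate x.toList 0).foldl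
      (fun d q => if q.2 = '*' then d.modify i ([] : List Int) (fun v => v ++ [q.1]) else d)
      (d.insert i ([] : List Int))
      = d.insert i (starList x.toList 0) := by
    rw [innerA x.toList 0 i _ (PySem.Dict.contains_insert_self d i _)
      (PySem.Dict.nodup_keys_insert d i _ hn)]
    rw [PySem.Dict.getD_insert_self, PySem.Dict.insert_insert_self]
    simp
  have hB : ((PySem.List.slice (PySem.Chars.splitOn x.toList ['*']) none (some (-1))).foldl
      psStep ((-1 : Int), ([] : List Int))).2 = starList x.toList 0 := by
    rw [PySem.List.slice_to_neg_one, splitOn_eq_spE]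
    have := fold_spE x.toList (-1)
    simpa using this
  rw [hA, hB, PySem.Dict.getD_insert_self, splitOn_eq_spE]
  by_cases hmem : '*' ∈ x.toList
  · rw [if_neg (by
      rw [List.length_eq_zero_iff]
      intro h0
      exact absurd hmem (by rwa [starList_nil_iff] at h0 ))]
    rw [if_pos ((parts_gt_one_iff x.toList).mpr hmem)]
  · have h0 : starList x.toList 0 = [] := (starList_nil_iff _ _).mpr hmem
    rw [h0]
    rw [if_pos (by simp)]
    rw [if_neg (by intro h; exact hmem ((parts_gt_one_iff x.toList).mp h))]
    exact erase_insert_fresh d i [] hc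

-- both outer folds agree, by induction with the invariant "all keys are < s"
theorem outer_eq (rs : List String) (s : Int) (d : PySem.Dict Int (List Int))
    (hn : d.keys.Nodup) (hlt : ∀ k ∈ d.keys, k < s) :
    (PySem.List.enumerate rs s).foldl (fun (d : PySem.Dict Int (List Int)) p =>
      let row := p.2.toList
      let d1 := d.insert p.1 ([] : List Int)
      let d2 := (PySem.List.enumerate row 0).foldl
        (fun d q => if q.2 = '*' then d.modify p.1 ([] : List Int) (fun v => v ++ [q.1]) else d) d1
      if (d2.getD p.1 ([] : List Int)).length = 0 then d2.erase p.1 else d2) d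
    = (PySem.List.enumerate rs s).foldl (fun (d : PySem.Dict Int (List Int)) p =>
      let parts := PySem.Chars.splitOn p.2.toList ['*']
      if 1 < parts.length then
        d.insert p.1 ((PySem.List.slice parts none (some (-1))).foldl psStep ((-1 : Int), ([] : List Int))).2
      else d) d := by
  induction rs generalizing s d with
  | nil => rfl
  | cons x t ih =>
    rw [PySem.List.enumerate_cons, List.foldl_cons, List.foldl_cons]
    have hc : d.contains s = false := by
      by_contra h
      have := (PySem.Dict.contains_iff_mem_keys d s).mp (by simpa using h)
      exact absurd (hlt s this) (by omega)
    rw [step_eq d s x hc hn]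
    simp only []
    by_cases hgt : 1 < (PySem.Chars.splitOn x.toList ['*']).length
    · simp only [if_pos hgt]
      apply ih (s + 1)
      · exact PySem.Dict.nodup_keys_insert d s _ hn
      · intro k hk
        rw [PySem.Dict.keys_insert_of_not_contains d _ hc] at hk
        rcases List.mem_append.mp hk with h | h
        · have := hlt k h; omega
        · simp at h; omega
    · simp only [if_neg hgt]
      exact ih (s + 1) d hn (fun k hk => by have := hlt k hk; omega)

-- ===== VERDICT =====
theorem get_gears_spec : Claim_equal_get_gears := by
  intro raw _
  unfold Spec_get_gears get_gears get_gears_alt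
  rw [outer_eq raw 0 PySem.Dict.empty (by simp [PySem.Dict.keys_empty])
    (by simp [PySem.Dict.keys_empty])]
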